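-- pv_equiv track=rewrite | github.com/pratiksinha312511/Tabular_RAG_pipeline | guardrails.py | check_confidence
-- ===== SOURCE A (Python) =====
-- def check_confidence(response_text: str) -> list[str]:
--     phrases = [
--         "i'm not sure", "i am not sure",
--         "i don't know", "i do not know",
--         "insufficient data", "not enough data",
--         "cannot determine", "can't determine",
--         "no data available", "no transactions found",
--     ]
--     for p in phrases:
--         if p in response_text.lower():
--             return ["low_confidence"]
--     return []
-- ===== SOURCE B (Python) =====
-- PHRASES = (
--     "i'm not sure", "i am not sure",
--     "i don't know", "i do not know",
--     "insufficient data", "not enough data",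
--     "cannot determine", "can't determine",
--     "no data available", "no transactions found",
-- )
--
-- def check_confidence(response_text: str) -> list[str]:
--     # One left-to-right pass over the lowered text: at each position test
--     # whether some phrase starts there, instead of one full substring scan
--     # per phrase.
--     t = response_text.lower()
--     if any(t.startswith(p, i) for i in range(len(t)) for p in PHRASES):
--         return ["low_confidence"]
--     return []
-- ===== Notes on version B (the rewrite author's own statement) =====
-- stated objective: alternative
-- what changed: A loops over the phrase list and runs a full substring scan of the lowered text per phrase; B makes a single position-driven pass over the lowered text, testing at each index whether any phrase starts there (startswith).
import Mathlib
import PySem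

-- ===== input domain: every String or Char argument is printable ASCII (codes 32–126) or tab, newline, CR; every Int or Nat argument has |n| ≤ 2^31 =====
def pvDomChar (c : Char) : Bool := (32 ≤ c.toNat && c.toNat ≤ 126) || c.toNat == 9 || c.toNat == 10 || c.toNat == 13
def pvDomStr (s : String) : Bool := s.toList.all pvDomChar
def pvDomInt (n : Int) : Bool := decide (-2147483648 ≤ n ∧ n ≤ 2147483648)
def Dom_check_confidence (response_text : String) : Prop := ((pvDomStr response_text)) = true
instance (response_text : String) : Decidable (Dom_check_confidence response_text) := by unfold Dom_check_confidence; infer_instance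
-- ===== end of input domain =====

-- B replaces A's per-phrase full substring scans by a single position-driven pass
-- over the lowered text (alternative decomposition, same result).

-- ===== PORT A =====
def cc_phrases : List String := [
  "i'm not sure", "i am not sure",
  "i don't know", "i do not know",
  "insufficient data", "not enough data",
  "cannot determine", "can't determine",
  "no data available", "no transactions found"]

def cc_loopA (response_text : String) : List String → List String
  | [] => []
  | p :: ps =>
    if PySem.Str.isIn p (PySem.Str.lower response_text) then ["low_confidence"]
    else cc_loopA response_text ps

def check_confidence (response_text : String) : List String :=
  cc_loopA response_text cc_phrases

-- ===== PORT B =====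
-- one pass over the suffixes of the lowered text; at each position test every phrase with startswith
def cc_scan : List Char → Bool
  | [] => false
  | c :: rest => cc_phrases.any (fun p => p.toList.isPrefixOf (c :: rest)) || cc_scan rest

def check_confidence_alt (response_text : String) : List String :=
  if cc_scan (PySem.Str.lower response_text).toList then ["low_confidence"] else []

-- ===== PRECONDITION & SPEC =====
def Spec_check_confidence (response_text : String) (out : List String) : Prop := out = check_confidence_alt response_text
instance (response_text : String) (out : List String) : Decidable (Spec_check_confidence response_text out) := by unfold Spec_check_confidence; infer_instance

-- ===== CLAIM (what is proved, stated in full; the proofs are below) =====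
def Claim_equal_check_confidence : Prop := ∀ (response_text : String), Dom_check_confidence response_text → Spec_check_confidence response_text (check_confidence response_text)

-- ===== LEMMAS AND PROOFS =====

theorem cc_loopA_eq_any (response_text : String) (ps : List String) :
    cc_loopA response_text ps =
      if ps.any (fun p => PySem.Str.isIn p (PySem.Str.lower response_text)) then ["low_confidence"] else [] := by
  induction ps with
  | nil => simp [cc_loopA]
  | cons p ps ih =>
    by_cases h : PySem.Chars.isIn p.toList (PySem.Chars.lower response_text.toList) = true
    · simp [cc_loopA, h]
    · simp [cc_loopA, h, ih]

theorem cc_scan_iff (l : List Char) :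
    cc_scan l = true ↔ ∃ p ∈ cc_phrases, p.toList <:+: l := by
  induction l with
  | nil =>
    simp only [cc_scan]
    constructor
    · intro h; exact absurd h (by simp)
    · rintro ⟨p, hp, hinf⟩
      have : p.toList = [] := List.eq_nil_of_infix_nil hinf
      fin_cases hp <;> simp_all
  | cons c rest ih =>
    simp only [cc_scan, Bool.or_eq_true, List.any_eq_true, ih]
    constructor
    · rintro (⟨p, hp, hpre⟩ | ⟨p, hp, hinf⟩)
      · exact ⟨p, hp, (List.isPrefixOf_iff_prefix.mp hpre).isInfix⟩
      · exact ⟨p, hp, hinf.trans (List.infix_cons_iff.mpr (Or.inr List.infix_rfl))⟩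
    · rintro ⟨p, hp, hinf⟩
      rcases List.infix_cons_iff.mp hinf with h | h
      · exact Or.inl ⟨p, hp, List.isPrefixOf_iff_prefix.mpr h⟩
      · exact Or.inr ⟨p, hp, h⟩

-- ===== VERDICT (by name: the statement is the Claim_ definition above) =====
theorem check_confidence_spec : Claim_equal_check_confidence := by
  intro s _
  unfold Spec_check_confidence check_confidence check_confidence_alt
  rw [cc_loopA_eq_any]
  have hb : (cc_phrases.any fun p => PySem.Str.isIn p (PySem.Str.lower s)) =
      cc_scan (PySem.Str.lower s).toList := by
    rw [Bool.eq_iff_iff]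
    simp only [List.any_eq_true, cc_scan_iff, PySem.Str.isIn_iff_infix]
  rw [hb]
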